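-- pv_equiv track=rewrite | github.com/suaaaus/algo_test | 백준/Gold/5430. AC/AC.py | drlist
-- ===== SOURCE A (Python) =====
-- def drlist(p_func):
--     Dcount = 0
--     Rcount = 0
--     DRlist = []
--
--     for i in range(len(p_func)):
--         now = p_func[i]
--         if now == 'R':
--             if Dcount > 0:
--                 DRlist.append(Dcount) # 일단 추가
--                 Dcount = 0
--             Rcount += 1
--         else:  # 'D'
--             if Rcount > 0:
--                 DRlist.append(Rcount)
--                 Rcount = 0
--             Dcount += 1
--
--     # 마지막 문자
--     if Rcount > 0:
--         DRlist.append(Rcount)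
--     if Dcount > 0:
--         DRlist.append(Dcount)
--
--     return DRlist
-- ===== SOURCE B (Python) =====
-- def drlist(p_func):
--     out = []
--     i = 0
--     n = len(p_func)
--     while i < n:
--         key = p_func[i] == 'R'
--         j = i + 1
--         while j < n and (p_func[j] == 'R') == key:
--             j += 1
--         out.append(j - i)
--         i = j
--     return out
-- ===== Notes on version B (the rewrite author's own statement) =====
-- stated objective: idiomatic
-- what changed: Replaced the two-counter state machine with flush logic by a two-pointer grouping pass that scans each maximal run of equal key (c=='R') and appends its length directly.
import Mathlib
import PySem

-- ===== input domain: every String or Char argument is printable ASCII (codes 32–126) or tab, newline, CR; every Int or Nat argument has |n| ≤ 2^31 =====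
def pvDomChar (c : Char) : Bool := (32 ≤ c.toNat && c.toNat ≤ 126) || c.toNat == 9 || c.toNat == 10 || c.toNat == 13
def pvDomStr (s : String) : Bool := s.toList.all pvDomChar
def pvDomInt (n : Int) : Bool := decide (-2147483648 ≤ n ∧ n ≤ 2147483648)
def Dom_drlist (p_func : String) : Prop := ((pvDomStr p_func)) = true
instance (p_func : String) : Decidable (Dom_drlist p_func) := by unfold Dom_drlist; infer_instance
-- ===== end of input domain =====

-- B replaces A's two-counter state machine (flush-on-switch) by a grouping pass that
-- measures each maximal run of equal key (c == 'R') and emits its length directly (idiomatic).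


-- ===== PORT A =====
-- A's loop over the characters, carrying (Dcount, Rcount, DRlist); the base case is
-- the post-loop flush 'if Rcount > 0 … if Dcount > 0 …'.
def drlistLoop : List Char → Int → Int → List Int → List Int
  | [], dcount, rcount, acc =>
      (acc ++ (if rcount > 0 then [rcount] else [])) ++ (if dcount > 0 then [dcount] else [])
  | c :: cs, dcount, rcount, acc =>
      if c == 'R' then
        if dcount > 0 then drlistLoop cs 0 (rcount + 1) (acc ++ [dcount])
        else drlistLoop cs dcount (rcount + 1) acc
      else
        if rcount > 0 then drlistLoop cs (dcount + 1) 0 (acc ++ [rcount])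
        else drlistLoop cs (dcount + 1) rcount acc

def drlist (p_func : String) : List Int := drlistLoop p_func.toList 0 0 []

-- ===== PORT B =====
-- B's inner while loop: length of the maximal prefix whose key (c == 'R') equals k,
-- together with the remaining characters.
def pvRunLen (k : Bool) : List Char → Nat × List Char
  | [] => (0, [])
  | c :: cs =>
      if (c == 'R') == k then
        let r := pvRunLen k cs
        (r.1 + 1, r.2)
      else (0, c :: cs)

theorem pvRunLen_snd_le (k : Bool) (cs : List Char) : (pvRunLen k cs).2.length ≤ cs.length := by
  induction cs with
  | nil => simp [pvRunLen]
  | cons c cs ih =>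
      simp only [pvRunLen]
      split
      · exact Nat.le_succ_of_le ih
      · simp

-- B's outer while loop: one group per iteration.
def drlistGroups : List Char → List Int
  | [] => []
  | c :: cs =>
      let r := pvRunLen (c == 'R') cs
      ((r.1 : Int) + 1) :: drlistGroups r.2
termination_by l => l.length
decreasing_by
  simpa [Nat.lt_succ_iff] using pvRunLen_snd_le (c == 'R') cs

def drlist_alt (p_func : String) : List Int := drlistGroups p_func.toList

-- ===== PRECONDITION & SPEC =====
def Spec_drlist (p_func : String) (out : List Int) : Prop := out = drlist_alt p_func
instance (p_func : String) (out : List Int) : Decidable (Spec_drlist p_func out) := by unfold Spec_drlist; infer_instance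

-- ===== CLAIM (what is proved, stated in full; the proofs are below) =====
def Claim_equal_drlist : Prop := ∀ (p_func : String), Dom_drlist p_func → Spec_drlist p_func (drlist p_func)

-- ===== LEMMAS AND PROOFS =====

-- Invariant: mid-run, A's live counter (Rcount for an R-run / Dcount for a D-run) holds
-- n > 0 and equals B's partial group; the other counter is 0.
theorem drlistLoop_run (cs : List Char) :
    (∀ (l : List Int) (n : Int), 0 < n →
      drlistLoop cs 0 n l
        = l ++ (n + ((pvRunLen true cs).1 : Int)) :: drlistGroups (pvRunLen true cs).2) ∧
    (∀ (l : List Int) (n : Int), 0 < n →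
      drlistLoop cs n 0 l
        = l ++ (n + ((pvRunLen false cs).1 : Int)) :: drlistGroups (pvRunLen false cs).2) := by
  induction cs with
  | nil =>
      refine ⟨fun l n hn => ?_, fun l n hn => ?_⟩ <;>
        simp [drlistLoop, drlistGroups, pvRunLen, hn]
  | cons c cs ih =>
      constructor
      · intro l n hn
        cases h : (c == 'R') with
        | true =>
            have hrun : pvRunLen true (c :: cs)
                = ((pvRunLen true cs).1 + 1, (pvRunLen true cs).2) := by simp [pvRunLen, h]
            rw [show drlistLoop (c :: cs) 0 n l = drlistLoop cs 0 (n + 1) l by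
              simp [drlistLoop, h]]
            rw [ih.1 l (n + 1) (by omega), hrun,
              show n + ((((pvRunLen true cs).1 + 1 : Nat)) : Int)
                  = n + 1 + ((pvRunLen true cs).1 : Int) by push_cast; ring]
        | false =>
            have hrun : pvRunLen true (c :: cs) = (0, c :: cs) := by simp [pvRunLen, h]
            rw [show drlistLoop (c :: cs) 0 n l = drlistLoop cs 1 0 (l ++ [n]) by
              simp [drlistLoop, h, hn]]
            rw [ih.2 (l ++ [n]) 1 (by omega), hrun]
            have hgrp : drlistGroups (c :: cs)
                = (((pvRunLen false cs).1 : Int) + 1) :: drlistGroups (pvRunLen false cs).2 := by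
              simp [drlistGroups, h]
            rw [hgrp]
            simp only [List.append_assoc, List.cons_append, List.nil_append, Nat.cast_zero]
            rw [show (1 : Int) + ((pvRunLen false cs).1 : Int)
                  = ((pvRunLen false cs).1 : Int) + 1 by ring,
              show n + (0 : Int) = n by ring]
      · intro l n hn
        cases h : (c == 'R') with
        | false =>
            have hrun : pvRunLen false (c :: cs)
                = ((pvRunLen false cs).1 + 1, (pvRunLen false cs).2) := by simp [pvRunLen, h]
            rw [show drlistLoop (c :: cs) n 0 l = drlistLoop cs (n + 1) 0 l by
              simp [drlistLoop, h]]
            rw [ih.2 l (n + 1) (by omega), hrun,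
              show n + ((((pvRunLen false cs).1 + 1 : Nat)) : Int)
                  = n + 1 + ((pvRunLen false cs).1 : Int) by push_cast; ring]
        | true =>
            have hrun : pvRunLen false (c :: cs) = (0, c :: cs) := by simp [pvRunLen, h]
            rw [show drlistLoop (c :: cs) n 0 l = drlistLoop cs 0 1 (l ++ [n]) by
              simp [drlistLoop, h, hn]]
            rw [ih.1 (l ++ [n]) 1 (by omega), hrun]
            have hgrp : drlistGroups (c :: cs)
                = (((pvRunLen true cs).1 : Int) + 1) :: drlistGroups (pvRunLen true cs).2 := by
              simp [drlistGroups, h]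
            rw [hgrp]
            simp only [List.append_assoc, List.cons_append, List.nil_append, Nat.cast_zero]
            rw [show (1 : Int) + ((pvRunLen true cs).1 : Int)
                  = ((pvRunLen true cs).1 : Int) + 1 by ring,
              show n + (0 : Int) = n by ring]

theorem drlistLoop_start (cs : List Char) : drlistLoop cs 0 0 [] = drlistGroups cs := by
  cases cs with
  | nil => simp [drlistLoop, drlistGroups]
  | cons c cs =>
      cases h : (c == 'R') with
      | true =>
          rw [show drlistLoop (c :: cs) 0 0 [] = drlistLoop cs 0 1 [] by
            simp [drlistLoop, h]]
          rw [(drlistLoop_run cs).1 [] 1 (by omega)]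
          simp [drlistGroups, h]
          ring
      | false =>
          rw [show drlistLoop (c :: cs) 0 0 [] = drlistLoop cs 1 0 [] by
            simp [drlistLoop, h]]
          rw [(drlistLoop_run cs).2 [] 1 (by omega)]
          simp [drlistGroups, h]
          ring

-- ===== VERDICT (by name: the statement is the Claim_ definition above) =====
theorem drlist_spec : Claim_equal_drlist := by
  intro p _
  unfold Spec_drlist drlist drlist_alt
  exact drlistLoop_start p.toList
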